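-- pv_equiv track=rewrite | github.com/danil614/test-tetrika-junior | task2/processor.py | count_by_first_letter
-- ===== SOURCE A (Python) =====
-- from collections import defaultdict
-- from typing import Dict, Iterable
--
-- def count_by_first_letter(titles: Iterable[str]) -> Dict[str, int]:
--     """
--     Подсчитывает количество элементов, начинающихся с каждой буквы.
--     """
--
--     counter: Dict[str, int] = defaultdict(int)
--     for title in titles:
--         if not title:
--             continue
--         first_char = title[0].upper()
--         counter[first_char] += 1
--     return dict(counter)
-- ===== SOURCE B (Python) =====
-- def count_by_first_letter(titles):
--     """
--     Count titles per uppercased first letter by recursive count-and-remove: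
--     take the first letter still present, count it by the length drop after
--     filtering it out, and recurse on the remainder.
--     """
--     firsts = [t[0].upper() for t in titles if t]
--
--     def go(xs):
--         if not xs:
--             return {}
--         ch = xs[0]
--         rest = [x for x in xs if x != ch]
--         out = {ch: len(xs) - len(rest)}
--         out.update(go(rest))
--         return out
--
--     return go(firsts)
-- ===== Notes on version B (the rewrite author's own statement) =====
-- stated objective: alternative
-- what changed: Replaces A's single pass with an incrementing dict by a recursion on the multiset of first letters: take the first remaining letter, count it as the length drop when filtering it out, and recurse on the filtered remainder.
import Mathlib
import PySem

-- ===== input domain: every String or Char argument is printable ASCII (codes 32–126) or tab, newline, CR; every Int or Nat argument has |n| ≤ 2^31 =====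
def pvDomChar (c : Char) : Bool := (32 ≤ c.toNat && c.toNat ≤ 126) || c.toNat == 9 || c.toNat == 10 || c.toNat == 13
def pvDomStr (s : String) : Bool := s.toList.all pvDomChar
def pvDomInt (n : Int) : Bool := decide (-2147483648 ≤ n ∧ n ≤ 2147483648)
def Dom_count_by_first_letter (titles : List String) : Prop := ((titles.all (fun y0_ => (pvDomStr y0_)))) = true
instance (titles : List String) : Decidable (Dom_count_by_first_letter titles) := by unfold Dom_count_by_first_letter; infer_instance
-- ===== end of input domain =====

-- B replaces A's incrementing-dict pass with a count-and-remove recursion on the list of first letters (alternative decomposition, same results).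

-- ===== PORT A =====
def count_by_first_letter (titles : List String) : List (String × Int) :=
  (titles.foldl
    (fun (counter : PySem.Dict String Int) title =>
      match title.toList with
      | [] => counter            -- if not title: continue
      | c :: _ =>
        let firstChar := String.ofList (PySem.Chars.upper [c])   -- title[0].upper()
        counter.insert firstChar (counter.getD firstChar 0 + 1))
    PySem.Dict.empty).items

-- ===== PORT B =====
-- Source B's recursive `go`: count the head letter as the length drop after filtering it out, recurse on the rest
def pvGo : List String → List (String × Int)
  | [] => []
  | ch :: tl =>
    (ch, ((ch :: tl).length : Int) - (((ch :: tl).filter (fun x => x != ch)).length : Int))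
      :: pvGo ((ch :: tl).filter (fun x => x != ch))
termination_by xs => xs.length
decreasing_by
  have h : ((ch :: tl).filter (fun x => x != ch)).length ≤ tl.length := by
    rw [List.filter_cons_of_neg (by simp)]
    exact List.length_filter_le _ tl
  simp only [List.length_cons]; omega

def count_by_first_letter_alt (titles : List String) : List (String × Int) :=
  pvGo ((titles.filter (fun t => !t.toList.isEmpty)).map
    (fun t => String.ofList (PySem.Chars.upper (t.toList.take 1))))   -- t[0].upper()

-- ===== PRECONDITION & SPEC =====
def Spec_count_by_first_letter (titles : List String) (out : List (String × Int)) : Prop := out = count_by_first_letter_alt titles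
instance (titles : List String) (out : List (String × Int)) : Decidable (Spec_count_by_first_letter titles out) := by unfold Spec_count_by_first_letter; infer_instance

-- ===== CLAIM (what is proved, stated in full; the proofs are below) =====
def Claim_equal_count_by_first_letter : Prop := ∀ (titles : List String), Dom_count_by_first_letter titles → Spec_count_by_first_letter titles (count_by_first_letter titles)

-- ===== LEMMAS AND PROOFS =====

-- A's skip-empty counting fold over titles is the counting fold over the `firsts` list.
lemma fold_eq_firsts_fold (titles : List String) (d : PySem.Dict String Int) :
    titles.foldl
      (fun (counter : PySem.Dict String Int) title =>
        match title.toList with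
        | [] => counter
        | c :: _ =>
          let firstChar := String.ofList (PySem.Chars.upper [c])
          counter.insert firstChar (counter.getD firstChar 0 + 1))
      d
    = ((titles.filter (fun t => !t.toList.isEmpty)).map
        (fun t => String.ofList (PySem.Chars.upper (t.toList.take 1)))).foldl
        (fun counter fc => counter.insert fc (counter.getD fc 0 + 1)) d := by
  induction titles generalizing d with
  | nil => rfl
  | cons t ts ih =>
    rcases h : t.toList with _ | ⟨c, cs⟩ <;>
      simp [List.foldl, List.filter, h, ih]

-- first-occurrence dedup commutes with filter
lemma ofList_filter (p : String → Bool) (xs : List String) :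
    PySem.Set.ofList (xs.filter p) = List.filter p (PySem.Set.ofList xs) := by
  induction xs with
  | nil => rfl
  | cons a tl ih =>
    by_cases h : p a = true
    · rw [List.filter_cons_of_pos h, PySem.Set.ofList_cons, PySem.Set.ofList_cons,
          List.filter_cons_of_pos h]
      simp only [PySem.Set.discard, ih, List.filter_filter]
      congr 1
      apply List.filter_congr
      intro y _
      rw [Bool.and_comm]
    · rw [List.filter_cons_of_neg h, PySem.Set.ofList_cons, List.filter_cons_of_neg h, ih]
      simp only [PySem.Set.discard, List.filter_filter]
      apply List.filter_congr
      intro y _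
      by_cases hy : (y == a) = true
      · have hya : y = a := eq_of_beq hy
        subst hya
        simp_all
      · simp [hy]

-- pvGo computes Counter(xs).items: keys in first-appearance order with their multiplicities
lemma pvGo_eq_counter_items (xs : List String) :
    pvGo xs = (PySem.Set.ofList xs).map (fun k => (k, (xs.count k : Int))) := by
  induction xs using pvGo.induct with
  | case1 => simp [pvGo, PySem.Set.ofList_nil]
  | case2 ch tl ih =>
    have hrest : (ch :: tl).filter (fun x => x != ch) = tl.filter (fun x => x != ch) :=
      List.filter_cons_of_neg (by simp)
    have hcnt : tl.countP (fun x => decide ¬((fun x => x != ch) x = true)) = tl.count ch := by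
      unfold List.count
      apply List.countP_congr
      intro y _
      by_cases hy : y = ch <;> simp [hy]
    have hsplit := List.length_eq_countP_add_countP (fun x => x != ch) (l := tl)
    rw [hcnt] at hsplit
    have hflen : ((ch :: tl).filter (fun x => x != ch)).length = tl.countP (fun x => x != ch) := by
      rw [hrest, ← List.countP_eq_length_filter]
    have hlen : ((ch :: tl).length : Int) - (((ch :: tl).filter (fun x => x != ch)).length : Int)
        = ((ch :: tl).count ch : Int) := by
      rw [hflen]
      simp only [List.length_cons, List.count_cons_self]
      push_cast
      omega
    rw [pvGo, ih, hlen, PySem.Set.ofList_cons]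
    have hdisc : PySem.Set.discard (PySem.Set.ofList tl) ch
        = PySem.Set.ofList (tl.filter (fun x => x != ch)) := by
      rw [ofList_filter]
      simp only [PySem.Set.discard, bne]
    rw [List.map_cons, hrest, ← hdisc]
    congr 1
    apply List.map_congr_left
    intro k hk
    have hk' : k ≠ ch := by
      rw [PySem.Set.mem_discard] at hk
      exact hk.2
    have hcount : ((ch :: tl).filter (fun x => x != ch)).count k = (ch :: tl).count k := by
      unfold List.count
      rw [List.countP_filter]
      apply List.countP_congr
      intro y _
      by_cases hy : y = k <;> simp_all
    rw [← hcount, hrest]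

theorem count_by_first_letter_spec : Claim_equal_count_by_first_letter := by
  intro titles _
  unfold Spec_count_by_first_letter count_by_first_letter count_by_first_letter_alt
  rw [fold_eq_firsts_fold, PySem.Dict.foldl_insert_getD_add_one_eq_counter,
      PySem.Dict.items_counter, pvGo_eq_counter_items]
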